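-- pv_equiv track=rewrite | github.com/cassanof/CodeRM | coderm/dataset/reasoning_steps_to_cot.py | reasoning_steps_to_cot
-- ===== SOURCE A (Python) =====
-- from typing import List
--
-- def punctuation_join(lst: List[str]) -> str:
--     """
--     Joins a list of strings with ", " unless it's the last element or if there is already a punctuation mark.
--     """
--     result = ""
--     for i, s in enumerate(lst):
--         if i != 0:
--             result += ", "
--         if s[-1] not in [".", "!", "?"]:
--             result += s
--         else:
--             result += s[:-1]
--     return result
--
-- def cottify_reasoning_steps(code: str) -> List[str]:
--     lines = code.split('\n')
--     comments = []
--     current_comment = []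
--
--     for line in lines:
--         stripped_line = line.lstrip()
--         if stripped_line.startswith('#'):
--             comment_content = stripped_line[1:].strip()
--             spaces = len(line) - len(stripped_line)
--             if len(current_comment) == 0:
--                 current_comment.append(f"# {' ' * spaces}- {comment_content}")
--             else:
--                 current_comment.append(comment_content)
--         else:
--             if current_comment:
--                 comments.append(punctuation_join(current_comment))
--                 current_comment = []
--
--     if current_comment:
--         comments.append(punctuation_join(current_comment))
--
--     return comments
--
-- def reasoning_steps_to_cot(code) -> str:
--     """"
--     Takes a program with reasoning steps and converts it to a program with
--     comments on top in a bullet point format.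
--
--     Example:
--     Input:
--     ```
--     # This function adds 1 to the input
--     def f(x):
--         # We add 1 to the input
--         return x + 1
--     ```
--     Output:
--     ```
--     # - This function adds 1 to the input
--     #   - We add 1 to the input
--     def f(x):
--         return x + 1
--     ```
--     """
--     lines = code.split("\n")
--     cots = cottify_reasoning_steps(code)
--     new_lines = []
--     for line in lines:
--         if not line.lstrip().startswith("#"):
--             new_lines.append(line)
--
--     cots = "\n".join(cots)
--     new_lines = "\n".join(new_lines)
--     return f"{cots}\n{new_lines}"
-- ===== SOURCE B (Python) =====
-- def reasoning_steps_to_cot(code) -> str: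
--     """Stateless pairwise formulation: each line's contribution is a pure
--     function of the pair (previous line, line); fragments are concatenated
--     flat and the leading newline sliced off -- no run grouping, no mutable
--     accumulator state, no second pass over runs."""
--     lines = code.split("\n")
--
--     def frag(prev, line):
--         s = line.lstrip()
--         if not s.startswith("#"):
--             return ""
--         if prev is not None and prev.lstrip().startswith("#"):
--             sep, piece = ", ", s[1:].strip()
--         else:
--             sep, piece = "\n", "# " + " " * (len(line) - len(s)) + "- " + s[1:].strip()
--         return sep + (piece[:-1] if piece[-1] in ".!?" else piece)
--
--     cots = "".join(frag(p, l) for p, l in zip([None] + lines, lines))[1:]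
--     kept = "\n".join(l for l in lines if not l.lstrip().startswith("#"))
--     return cots + "\n" + kept
-- ===== Notes on version B (the rewrite author's own statement) =====
-- stated objective: simpler
-- what changed: Replaces A's stateful run-accumulator fold (collect a current_comment list, flush it through punctuation_join at run ends and again after the loop) plus a second filtering pass with a stateless pairwise formulation: each line's output fragment is a pure function of (previous line, line), the fragments are concatenated flat and the leading newline is sliced off, so no run grouping or accumulator state exists at all.
import Mathlib
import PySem

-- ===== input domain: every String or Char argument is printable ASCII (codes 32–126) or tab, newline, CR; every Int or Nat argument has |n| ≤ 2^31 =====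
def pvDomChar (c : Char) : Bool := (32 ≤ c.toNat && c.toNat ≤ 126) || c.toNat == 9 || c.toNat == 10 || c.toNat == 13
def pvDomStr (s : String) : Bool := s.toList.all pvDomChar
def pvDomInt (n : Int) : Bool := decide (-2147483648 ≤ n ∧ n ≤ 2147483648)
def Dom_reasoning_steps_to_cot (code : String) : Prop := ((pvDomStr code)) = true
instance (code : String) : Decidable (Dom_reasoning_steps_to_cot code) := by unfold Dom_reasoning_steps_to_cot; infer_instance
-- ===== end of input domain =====

-- B is a simpler stateless decomposition: each line's output fragment is a pure function of the
-- pair (previous line, line); the fragments are concatenated flat and the leading newline sliced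
-- off — no run grouping, no mutable accumulator, no second filtering pass re-deriving state.
-- Equivalence is on the return value.

-- ===== PORT A =====
-- shared tiny expressions both Pythons write verbatim:
-- line.lstrip().startswith('#'),  stripped[1:].strip(),  f"# {' ' * spaces}- {content}"
def pvIsComment (l : List Char) : Bool :=
  PySem.Chars.startswith (PySem.Chars.lstrip l) ['#']

def pvContent (l : List Char) : List Char :=
  PySem.Chars.strip (PySem.List.slice (PySem.Chars.lstrip l) (some 1) none)

def pvFmtFirst (l : List Char) : List Char :=
  let stripped := PySem.Chars.lstrip l
  let spaces := l.length - stripped.length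
  ['#', ' '] ++ List.replicate spaces ' ' ++ ['-', ' '] ++
    PySem.Chars.strip (PySem.List.slice stripped (some 1) none)

-- punctuation_join: accumulator loop over enumerate(lst); s[-1] = pyGet? s (-1)
-- (none = IndexError in Python, excluded by Pre_; there s = [] and the loop body adds nothing)
def punctuation_join (lst : List (List Char)) : List Char :=
  (PySem.List.enumerate lst).foldl (fun result p =>
    let result := if p.1 ≠ (0 : Int) then result ++ [',', ' '] else result
    match PySem.List.pyGet? p.2 (-1) with
    | some c => if c ∈ ['.', '!', '?'] then result ++ PySem.List.slice p.2 none (some (-1))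
                else result ++ p.2
    | none => result) []

-- cottify_reasoning_steps: fold over the lines carrying (comments, current_comment)
def pvCottifyStep (st : List (List Char) × List (List Char)) (line : List Char) :
    List (List Char) × List (List Char) :=
  let stripped := PySem.Chars.lstrip line
  if PySem.Chars.startswith stripped ['#'] then
    if st.2.length = 0 then (st.1, st.2 ++ [pvFmtFirst line])
    else (st.1, st.2 ++ [pvContent line])
  else
    if st.2 ≠ [] then (st.1 ++ [punctuation_join st.2], []) else st

def cottify_reasoning_steps (code : List Char) : List (List Char) :=
  let lines := PySem.Chars.splitOn code ['\n']
  let p := lines.foldl pvCottifyStep ([], [])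
  if p.2 ≠ [] then p.1 ++ [punctuation_join p.2] else p.1

def reasoning_steps_to_cot (code : String) : String :=
  let lines := PySem.Chars.splitOn code.toList ['\n']
  let cots := cottify_reasoning_steps code.toList
  let new_lines := lines.foldl
    (fun acc line => if !pvIsComment line then acc ++ [line] else acc) []
  String.ofList (PySem.Chars.join ['\n'] cots ++ ['\n'] ++ PySem.Chars.join ['\n'] new_lines)

-- ===== PORT B =====
-- piece[:-1] if piece[-1] in ".!?" else piece   (pyGet? none = IndexError in Python, excluded by Pre_)
def pvTrim (p : List Char) : List Char :=
  match PySem.List.pyGet? p (-1) with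
  | some c => if c ∈ ['.', '!', '?'] then PySem.List.slice p none (some (-1)) else p
  | none => p

-- frag(prev, line): the pure per-line fragment of Source B
def pvFrag (prev : Option (List Char)) (line : List Char) : List Char :=
  let s := PySem.Chars.lstrip line
  if !PySem.Chars.startswith s ['#'] then []
  else
    let prevc := match prev with
      | some p => PySem.Chars.startswith (PySem.Chars.lstrip p) ['#']
      | none => false
    let piece := if prevc then PySem.Chars.strip (PySem.List.slice s (some 1) none)
      else ['#', ' '] ++ List.replicate (line.length - s.length) ' ' ++ ['-', ' '] ++
        PySem.Chars.strip (PySem.List.slice s (some 1) none)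
    (if prevc then [',', ' '] else ['\n']) ++ pvTrim piece

def reasoning_steps_to_cot_alt (code : String) : String :=
  let lines := PySem.Chars.splitOn code.toList ['\n']
  let cots := PySem.List.slice
    ((((none :: lines.map some).zip lines).map (fun q => pvFrag q.1 q.2)).flatten)
    (some 1) none
  let kept := PySem.Chars.join ['\n'] (lines.filter (fun l => !pvIsComment l))
  String.ofList (cots ++ ['\n'] ++ kept)

-- ===== PRECONDITION & SPEC =====
-- Pre_ excludes exactly the inputs on which the Python A raises IndexError (and B raises it too):
-- a comment line whose content after the hash mark strips to empty, immediately preceded by another comment line.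
def Pre_reasoning_steps_to_cot (code : String) : Prop :=
  List.IsChain (fun a b => ¬(pvIsComment a = true ∧ pvIsComment b = true ∧ pvContent b = []))
    (PySem.Chars.splitOn code.toList ['\n'])
instance (code : String) : Decidable (Pre_reasoning_steps_to_cot code) := by
  unfold Pre_reasoning_steps_to_cot; infer_instance

def pvWitness_reasoning_steps_to_cot : String := "# add one\n#   done.\ndef f(x):\n    return x + 1"

def Spec_reasoning_steps_to_cot (code : String) (out : String) : Prop := out = reasoning_steps_to_cot_alt code
instance (code : String) (out : String) : Decidable (Spec_reasoning_steps_to_cot code out) := by unfold Spec_reasoning_steps_to_cot; infer_instance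

-- ===== CLAIM =====
def Claim_equal_reasoning_steps_to_cot : Prop := ∀ (code : String), Dom_reasoning_steps_to_cot code → Pre_reasoning_steps_to_cot code → Spec_reasoning_steps_to_cot code (reasoning_steps_to_cot code)

-- ===== LEMMAS AND PROOFS =====

-- proof-only helpers: the grouped view both programs are proved equal to

def pvJoinGroup (grp : List (List Char)) : List Char :=
  match grp with
  | [] => []
  | first :: rest =>
      PySem.Chars.join [',', ' '] ((pvFmtFirst first :: rest.map pvContent).map pvTrim)

def pvGo : List (List Char) → List (List Char) × List (List Char)
  | [] => ([], [])
  | l :: ls =>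
    if pvIsComment l then
      let r := pvGo (ls.dropWhile pvIsComment)
      (pvJoinGroup (l :: ls.takeWhile pvIsComment) :: r.1, r.2)
    else
      let r := pvGo (ls.dropWhile (fun x => !pvIsComment x))
      (r.1, (l :: ls.takeWhile (fun x => !pvIsComment x)) ++ r.2)
termination_by ls => ls.length
decreasing_by
  · exact Nat.lt_succ_of_le (List.length_dropWhile_le _ _)
  · exact Nat.lt_succ_of_le (List.length_dropWhile_le _ _)

-- the loop body of punctuation_join, named for the proofs
def pvPJF : List Char → Int × List Char → List Char := fun result p =>
  let result := if p.1 ≠ (0 : Int) then result ++ [',', ' '] else result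
  match PySem.List.pyGet? p.2 (-1) with
  | some c => if c ∈ ['.', '!', '?'] then result ++ PySem.List.slice p.2 none (some (-1))
              else result ++ p.2
  | none => result

theorem pvPJF_eq (res : List Char) (i : Int) (s : List Char) :
    pvPJF res (i, s) = (if i ≠ (0 : Int) then res ++ [',', ' '] else res) ++ pvTrim s := by
  unfold pvPJF pvTrim
  dsimp only
  rcases s.eq_nil_or_concat with rfl | ⟨ys, y, rfl⟩
  · have h0 : PySem.List.pyGet? ([] : List Char) (-1) = none := by decide
    simp [h0]
  · simp only [List.concat_eq_append, PySem.List.pyGet?_neg_one_append_singleton]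
    split_ifs <;> rfl

theorem pv_pj_fold_tail : ∀ (t : List (List Char)) (s : Int), 1 ≤ s → ∀ (res : List Char),
    (PySem.List.enumerate t s).foldl pvPJF res
      = res ++ (t.map (fun x => [',', ' '] ++ pvTrim x)).flatten := by
  intro t
  induction t with
  | nil => intro s hs res; simp [PySem.List.enumerate_nil]
  | cons x t ih =>
    intro s hs res
    rw [PySem.List.enumerate_cons, List.foldl_cons, pvPJF_eq, ih (s + 1) (by omega)]
    have hns : s ≠ 0 := by omega
    simp [hns]

theorem pv_join_flat (sep : List Char) : ∀ (rest : List (List Char)) (a : List Char),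
    PySem.Chars.join sep (a :: rest) = a ++ (rest.map (fun x => sep ++ x)).flatten := by
  intro rest
  induction rest with
  | nil => intro a; simp [PySem.Chars.join_singleton]
  | cons b r ih => intro a; rw [PySem.Chars.join_cons_cons, ih b]; simp

theorem pv_pj_eq (lst : List (List Char)) :
    punctuation_join lst = PySem.Chars.join [',', ' '] (lst.map pvTrim) := by
  cases lst with
  | nil => simp [punctuation_join, PySem.List.enumerate_nil, PySem.Chars.join_nil]
  | cons x t =>
    show (PySem.List.enumerate (x :: t) 0).foldl pvPJF [] = _
    rw [PySem.List.enumerate_cons, List.foldl_cons, pvPJF_eq]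
    simp only [ne_eq, not_true_eq_false, if_false, List.nil_append, zero_add]
    rw [pv_pj_fold_tail t 1 le_rfl, List.map_cons, pv_join_flat]
    simp [List.map_map, Function.comp_def]

theorem pv_pjgroup (l : List Char) (grp : List (List Char)) :
    punctuation_join (pvFmtFirst l :: grp.map pvContent) = pvJoinGroup (l :: grp) := by
  rw [pv_pj_eq]; rfl

-- behaviour of A's fold step
theorem pv_step_c_new (acc : List (List Char)) (l : List Char) (h : pvIsComment l = true) :
    pvCottifyStep (acc, []) l = (acc, [pvFmtFirst l]) := by
  unfold pvIsComment at h; simp [pvCottifyStep, h]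

theorem pv_step_c_app (acc cur : List (List Char)) (l : List Char)
    (h : pvIsComment l = true) (hc : cur ≠ []) :
    pvCottifyStep (acc, cur) l = (acc, cur ++ [pvContent l]) := by
  unfold pvIsComment at h
  simp [pvCottifyStep, h, List.length_eq_zero_iff, hc]

theorem pv_step_nc_nil (acc : List (List Char)) (l : List Char) (h : pvIsComment l = false) :
    pvCottifyStep (acc, []) l = (acc, []) := by
  unfold pvIsComment at h; simp [pvCottifyStep, h]

theorem pv_step_nc_flush (acc cur : List (List Char)) (l : List Char)
    (h : pvIsComment l = false) (hc : cur ≠ []) :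
    pvCottifyStep (acc, cur) l = (acc ++ [punctuation_join cur], []) := by
  unfold pvIsComment at h; simp [pvCottifyStep, h, hc]

theorem pv_fold_comments : ∀ (grp : List (List Char)), (∀ g ∈ grp, pvIsComment g = true) →
    ∀ (acc cur : List (List Char)), cur ≠ [] →
    grp.foldl pvCottifyStep (acc, cur) = (acc, cur ++ grp.map pvContent) := by
  intro grp
  induction grp with
  | nil => intro _ acc cur _; simp
  | cons g t ih =>
    intro hall acc cur hc
    rw [List.foldl_cons, pv_step_c_app acc cur g (hall g (by simp)) hc,
        ih (fun x hx => hall x (by simp [hx])) acc _ (by simp)]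
    simp

theorem pv_go1_nc (r : List Char) (rs : List (List Char)) (h : pvIsComment r = false) :
    (pvGo (r :: rs)).1 = (pvGo rs).1 := by
  cases rs with
  | nil => simp [pvGo, h]
  | cons x xs =>
    by_cases hx : pvIsComment x = true
    · have hdw : (x :: xs).dropWhile (fun y => !pvIsComment y) = x :: xs := by
        simp [hx]
      conv_lhs => rw [pvGo]
      simp [h, hdw]
    · simp only [Bool.not_eq_true] at hx
      have hdw : (x :: xs).dropWhile (fun y => !pvIsComment y)
          = xs.dropWhile (fun y => !pvIsComment y) := by
        simp [hx]
      conv_lhs => rw [pvGo]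
      conv_rhs => rw [pvGo]
      simp [h, hx, hdw]

theorem pv_main1 : ∀ (n : Nat) (lines : List (List Char)), lines.length ≤ n →
    ∀ (acc : List (List Char)),
    (if (lines.foldl pvCottifyStep (acc, [])).2 ≠ [] then
       (lines.foldl pvCottifyStep (acc, [])).1
         ++ [punctuation_join (lines.foldl pvCottifyStep (acc, [])).2]
     else (lines.foldl pvCottifyStep (acc, [])).1)
      = acc ++ (pvGo lines).1 := by
  intro n
  induction n with
  | zero =>
    intro lines hlen acc
    have : lines = [] := List.eq_nil_of_length_eq_zero (Nat.le_zero.mp hlen)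
    subst this; simp [pvGo]
  | succ n ih =>
    intro lines hlen acc
    cases lines with
    | nil => simp [pvGo]
    | cons l ls =>
      simp only [List.length_cons, Nat.add_le_add_iff_right] at hlen
      by_cases hc : pvIsComment l = true
      · have hgo : (pvGo (l :: ls)).1
            = pvJoinGroup (l :: ls.takeWhile pvIsComment)
              :: (pvGo (ls.dropWhile pvIsComment)).1 := by
          conv_lhs => rw [pvGo]
          simp [hc]
        have hall : ∀ g ∈ ls.takeWhile pvIsComment, pvIsComment g = true :=
          fun g hg => List.mem_takeWhile_imp hg
        have hsplit : ls.takeWhile pvIsComment ++ ls.dropWhile pvIsComment = ls :=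
          List.takeWhile_append_dropWhile
        rw [hgo]
        conv_lhs => rw [List.foldl_cons, pv_step_c_new acc l hc, ← hsplit]
        rw [List.foldl_append,
            pv_fold_comments _ hall acc [pvFmtFirst l] (by simp)]
        cases hdw : ls.dropWhile pvIsComment with
        | nil =>
          simp only [List.foldl_nil, ne_eq, List.cons_append, List.nil_append]
          rw [if_pos (by simp)]
          simp [pvGo, pv_pjgroup]
        | cons r rs =>
          have hne : ls.dropWhile pvIsComment ≠ [] := by simp [hdw]
          have hr : pvIsComment r = false := by
            have h2 := List.head_dropWhile_not pvIsComment hne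
            simpa [hdw] using h2
          have hrs : rs.length ≤ n := by
            have h1 : (ls.dropWhile pvIsComment).length ≤ ls.length :=
              List.length_dropWhile_le _ _
            rw [hdw] at h1; simp at h1; omega
          rw [List.foldl_cons,
              pv_step_nc_flush acc _ r hr (by simp), ih rs hrs, pv_go1_nc r rs hr]
          simp [pv_pjgroup]
      · simp only [Bool.not_eq_true] at hc
        rw [List.foldl_cons, pv_step_nc_nil acc l hc, ih ls hlen, pv_go1_nc l ls hc]

-- B-side: the fragment function depends on the previous line only through pvIsComment
def pvFragB (prevc : Bool) (line : List Char) : List Char :=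
  if !pvIsComment line then []
  else (if prevc then [',', ' '] else ['\n'])
    ++ pvTrim (if prevc then pvContent line else pvFmtFirst line)

theorem pvFrag_eq (p : Option (List Char)) (l : List Char) :
    pvFrag p l = pvFragB (match p with | none => false | some q => pvIsComment q) l := by
  cases p <;> · unfold pvFrag pvFragB pvIsComment pvContent pvFmtFirst; rfl

-- the flat fragment stream, indexed by whether the previous line was a comment
def pvFrags (b : Bool) : List (List Char) → List Char
  | [] => []
  | l :: ls => pvFragB b l ++ pvFrags (pvIsComment l) ls

theorem pv_zip_frags : ∀ (lines : List (List Char)) (p : Option (List Char)),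
    (((p :: lines.map some).zip lines).map (fun q => pvFrag q.1 q.2)).flatten
      = pvFrags (match p with | none => false | some q => pvIsComment q) lines := by
  intro lines
  induction lines with
  | nil => intro p; simp [pvFrags]
  | cons l ls ih =>
    intro p
    simp only [List.map_cons, List.zip_cons_cons, List.flatten_cons, pvFrags]
    rw [pvFrag_eq, ih (some l)]

theorem pv_frags_run : ∀ (grp : List (List Char)), (∀ g ∈ grp, pvIsComment g = true) →
    ∀ (rest : List (List Char)),
    pvFrags true (grp ++ rest)
      = (grp.map (fun g => [',', ' '] ++ pvTrim (pvContent g))).flatten ++ pvFrags true rest := by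
  intro grp
  induction grp with
  | nil => intro _ rest; simp
  | cons g t ih =>
    intro hall rest
    have hg : pvIsComment g = true := hall g (by simp)
    simp only [List.cons_append, pvFrags, hg, pvFragB, Bool.not_true, if_false,
      Bool.false_eq_true, if_true, List.map_cons, List.flatten_cons]
    rw [ih (fun x hx => hall x (by simp [hx])) rest]
    simp

theorem pv_frags_go : ∀ (n : Nat) (lines : List (List Char)), lines.length ≤ n →
    pvFrags false lines = (((pvGo lines).1).map (fun c => '\n' :: c)).flatten := by
  intro n
  induction n with
  | zero =>
    intro lines hlen
    have : lines = [] := List.eq_nil_of_length_eq_zero (Nat.le_zero.mp hlen)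
    subst this; simp [pvGo, pvFrags]
  | succ n ih =>
    intro lines hlen
    cases lines with
    | nil => simp [pvGo, pvFrags]
    | cons l ls =>
      simp only [List.length_cons, Nat.add_le_add_iff_right] at hlen
      by_cases hc : pvIsComment l = true
      · have hgo : (pvGo (l :: ls)).1
            = pvJoinGroup (l :: ls.takeWhile pvIsComment)
              :: (pvGo (ls.dropWhile pvIsComment)).1 := by
          conv_lhs => rw [pvGo]
          simp [hc]
        have hall : ∀ g ∈ ls.takeWhile pvIsComment, pvIsComment g = true :=
          fun g hg => List.mem_takeWhile_imp hg
        have hsplit : ls.takeWhile pvIsComment ++ ls.dropWhile pvIsComment = ls :=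
          List.takeWhile_append_dropWhile
        have hjg : pvJoinGroup (l :: ls.takeWhile pvIsComment)
            = pvTrim (pvFmtFirst l)
              ++ (((ls.takeWhile pvIsComment).map
                    (fun g => [',', ' '] ++ pvTrim (pvContent g))).flatten) := by
          rw [show pvJoinGroup (l :: ls.takeWhile pvIsComment)
              = PySem.Chars.join [',', ' ']
                  ((pvFmtFirst l :: (ls.takeWhile pvIsComment).map pvContent).map pvTrim) from rfl,
            List.map_cons, pv_join_flat]
          simp [List.map_map, Function.comp_def]
        have hrest : pvFrags true (ls.dropWhile pvIsComment)
            = (((pvGo (ls.dropWhile pvIsComment)).1).map (fun c => '\n' :: c)).flatten := by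
          cases hdw : ls.dropWhile pvIsComment with
          | nil => simp [pvFrags, pvGo]
          | cons r rs =>
            have hne : ls.dropWhile pvIsComment ≠ [] := by simp [hdw]
            have hr : pvIsComment r = false := by
              have h2 := List.head_dropWhile_not pvIsComment hne
              simpa [hdw] using h2
            have hrs : rs.length ≤ n := by
              have h1 : (ls.dropWhile pvIsComment).length ≤ ls.length :=
                List.length_dropWhile_le _ _
              rw [hdw] at h1; simp at h1; omega
            have hfragr : pvFragB true r = [] := by simp [pvFragB, hr]
            calc pvFrags true (r :: rs)
                = pvFragB true r ++ pvFrags (pvIsComment r) rs := rfl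
              _ = pvFrags false rs := by rw [hfragr, hr]; simp
              _ = (((pvGo rs).1).map (fun c => '\n' :: c)).flatten := ih rs hrs
              _ = _ := by rw [pv_go1_nc r rs hr]
        have hhead : pvFragB false l = '\n' :: pvTrim (pvFmtFirst l) := by
          simp [pvFragB, hc]
        calc pvFrags false (l :: ls)
            = pvFragB false l ++ pvFrags (pvIsComment l) ls := rfl
          _ = ('\n' :: pvTrim (pvFmtFirst l)) ++ pvFrags true ls := by rw [hhead, hc]
          _ = ('\n' :: pvTrim (pvFmtFirst l))
              ++ pvFrags true (ls.takeWhile pvIsComment ++ ls.dropWhile pvIsComment) := by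
                rw [hsplit]
          _ = _ := by
                rw [pv_frags_run _ hall, hrest, hgo, hjg]
                simp
      · simp only [Bool.not_eq_true] at hc
        have hfrag : pvFragB false l = [] := by simp [pvFragB, hc]
        calc pvFrags false (l :: ls)
            = pvFragB false l ++ pvFrags (pvIsComment l) ls := rfl
          _ = pvFrags false ls := by rw [hfrag, hc]; simp
          _ = (((pvGo ls).1).map (fun c => '\n' :: c)).flatten := ih ls hlen
          _ = _ := by rw [pv_go1_nc l ls hc]

-- drop 1 of the '\n'-prefixed flat stream is exactly the '\n'-join
theorem pv_drop_join (L : List (List Char)) :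
    ((L.map (fun c => '\n' :: c)).flatten).drop 1 = PySem.Chars.join ['\n'] L := by
  cases L with
  | nil => simp [PySem.Chars.join_nil]
  | cons c cs =>
    rw [pv_join_flat]
    simp

theorem pv_main : ∀ code : String, reasoning_steps_to_cot code = reasoning_steps_to_cot_alt code := by
  intro code
  unfold reasoning_steps_to_cot reasoning_steps_to_cot_alt cottify_reasoning_steps
  dsimp only
  rw [pv_main1 (PySem.Chars.splitOn code.toList ['\n']).length
        (PySem.Chars.splitOn code.toList ['\n']) le_rfl [],
      PySem.List.foldl_append_if (fun l => !pvIsComment l) (fun l => l)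
        (PySem.Chars.splitOn code.toList ['\n']) [],
      pv_zip_frags (PySem.Chars.splitOn code.toList ['\n']) none,
      pv_frags_go (PySem.Chars.splitOn code.toList ['\n']).length _ le_rfl,
      show ((1:Int)) = ((1:Nat):Int) from rfl,
      PySem.List.slice_from_natCast, pv_drop_join]
  simp

-- ===== VERDICT (by name: the statement is the Claim_ definition above) =====
theorem reasoning_steps_to_cot_spec : Claim_equal_reasoning_steps_to_cot := by
  intro code _ _
  exact pv_main code
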